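-- pv_equiv track=rewrite | github.com/FaberDS/aoc-2024-python | exercises/day_04.py | count_diagonal_all_directions
-- ===== SOURCE A (Python) =====
-- def count_diagonal_all_directions(a, kw):
--     n = len(kw)
--     count = 0
--     rows = len(a)
--     cols = len(a[0])
--
--     # Top-left to bottom-right
--     for start_row in range(rows):
--         word = ""
--         for k in range(min(rows - start_row, cols)):
--             word += a[start_row + k][k]
--             if len(word) == n:
--                 if word == kw:
--                     count += 1
--                 word = word[1:]  # Slide window
--
--     for start_col in range(1, cols):
--         word = ""
--         for k in range(min(rows, cols - start_col)):
--             word += a[k][start_col + k]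
--             if len(word) == n:
--                 if word == kw:
--                     count += 1
--                 word = word[1:]  # Slide window
--
--     # Top-right to bottom-left
--     for start_row in range(rows):
--         word = ""
--         for k in range(min(rows - start_row, cols)):
--             word += a[start_row + k][cols - 1 - k]
--             if len(word) == n:
--                 if word == kw:
--                     count += 1
--                 word = word[1:]  # Slide window
--
--     for start_col in range(cols - 2, -1, -1):
--         word = ""
--         for k in range(min(rows, start_col + 1)):
--             word += a[k][start_col - k]
--             if len(word) == n:
--                 if word == kw:
--                     count += 1
--                 word = word[1:]  # Slide window
--
--     # Bottom-left to top-right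
--     for start_row in range(rows - 1, -1, -1):
--         word = ""
--         for k in range(min(start_row + 1, cols)):
--             word += a[start_row - k][k]
--             if len(word) == n:
--                 if word == kw:
--                     count += 1
--                 word = word[1:]  # Slide window
--
--     for start_col in range(1, cols):
--         word = ""
--         for k in range(min(rows, cols - start_col)):
--             word += a[rows - 1 - k][start_col + k]
--             if len(word) == n:
--                 if word == kw:
--                     count += 1
--                 word = word[1:]  # Slide window
--
--     # Bottom-right to top-left
--     for start_row in range(rows - 1, -1, -1):
--         word = ""
--         for k in range(min(start_row + 1, cols)):
--             word += a[start_row - k][cols - 1 - k]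
--             if len(word) == n:
--                 if word == kw:
--                     count += 1
--                 word = word[1:]  # Slide window
--
--     for start_col in range(cols - 2, -1, -1):
--         word = ""
--         for k in range(min(rows, start_col + 1)):
--             word += a[rows - 1 - k][start_col - k]
--             if len(word) == n:
--                 if word == kw:
--                     count += 1
--                 word = word[1:]  # Slide window
--
--     return count
-- ===== SOURCE B (Python) =====
-- def _occ(s, w):
--     # overlapping occurrences of w in s
--     count = 0
--     t = s
--     while t:
--         if t.startswith(w):
--             count += 1
--         t = t[1:]
--     return count
--
--
-- def count_diagonal_all_directions(a, kw):
--     rows, cols = len(a), len(a[0])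
--     diagonals = []
--     # '\'-diagonals (c - r = d constant), read top-left -> bottom-right
--     for d in range(1 - rows, cols):
--         diagonals.append("".join(a[r][r + d] for r in range(max(0, -d), min(rows, cols - d))))
--     # '/'-diagonals (r + c = d constant), read top-right -> bottom-left
--     for d in range(rows + cols - 1):
--         diagonals.append("".join(a[r][d - r] for r in range(max(0, d - cols + 1), min(rows, d + 1))))
--     if not kw:
--         return 0
--     rkw = kw[::-1]
--     return sum(_occ(s, kw) + _occ(s, rkw) for s in diagonals)
-- ===== Notes on version B (the rewrite author's own statement) =====
-- stated objective: simpler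
-- what changed: A runs eight separate directional sliding-window scans over the grid; B groups the grid cells once into its '\'- and '/'-diagonal strings and counts overlapping occurrences of the keyword and of its reverse in each diagonal with one index scan.
import Mathlib
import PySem

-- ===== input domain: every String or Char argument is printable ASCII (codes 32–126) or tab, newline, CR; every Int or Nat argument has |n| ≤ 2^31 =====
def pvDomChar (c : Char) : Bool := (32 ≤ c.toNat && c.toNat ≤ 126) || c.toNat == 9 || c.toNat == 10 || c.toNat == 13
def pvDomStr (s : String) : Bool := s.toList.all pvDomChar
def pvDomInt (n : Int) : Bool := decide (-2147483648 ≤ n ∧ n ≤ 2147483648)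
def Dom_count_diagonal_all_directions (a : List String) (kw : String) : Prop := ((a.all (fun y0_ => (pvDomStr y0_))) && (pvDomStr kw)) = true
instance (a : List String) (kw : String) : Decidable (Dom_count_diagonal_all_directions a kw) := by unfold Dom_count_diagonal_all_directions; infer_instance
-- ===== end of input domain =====

-- B replaces A's eight directional sliding-window scans by grouping the grid into its
-- '\'- and '/'-diagonal strings once and counting overlapping occurrences of the keyword
-- and its reverse in each diagonal (objective: simpler decomposition, same asymptotic cost).


-- ===== PORT A =====
-- a[r][c] (both indices in range under Pre_; ' ' is an unreachable default)
def pvChar (a : List String) (r c : Int) : Char :=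
  (PySem.List.pyGet? ((PySem.List.pyGet? a r).getD "").toList c).getD ' '

-- body of A's inner loop: word += ch; if len(word) == n: (count bump on match) and slide
def pvStep (kw : List Char) (st : List Char × Int) (ch : Char) : List Char × Int :=
  let w := st.1 ++ [ch]
  if w.length = kw.length then (w.drop 1, if w = kw then st.2 + 1 else st.2)
  else (w, st.2)

def count_diagonal_all_directions (a : List String) (kw : String) : Int :=
  let kwL := kw.toList
  let rows : Int := a.length
  let cols : Int := ((PySem.List.pyGet? a 0).getD "").toList.length
  let c0 : Int := 0
  -- Top-left to bottom-right
  let c1 := (PySem.List.pyRange 0 rows 1).foldl (fun cnt s =>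
    ((PySem.List.pyRange 0 (min (rows - s) cols) 1).foldl
      (fun st k => pvStep kwL st (pvChar a (s + k) k)) ([], cnt)).2) c0
  let c2 := (PySem.List.pyRange 1 cols 1).foldl (fun cnt s =>
    ((PySem.List.pyRange 0 (min rows (cols - s)) 1).foldl
      (fun st k => pvStep kwL st (pvChar a k (s + k))) ([], cnt)).2) c1
  -- Top-right to bottom-left
  let c3 := (PySem.List.pyRange 0 rows 1).foldl (fun cnt s =>
    ((PySem.List.pyRange 0 (min (rows - s) cols) 1).foldl
      (fun st k => pvStep kwL st (pvChar a (s + k) (cols - 1 - k))) ([], cnt)).2) c2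
  let c4 := (PySem.List.pyRange (cols - 2) (-1) (-1)).foldl (fun cnt s =>
    ((PySem.List.pyRange 0 (min rows (s + 1)) 1).foldl
      (fun st k => pvStep kwL st (pvChar a k (s - k))) ([], cnt)).2) c3
  -- Bottom-left to top-right
  let c5 := (PySem.List.pyRange (rows - 1) (-1) (-1)).foldl (fun cnt s =>
    ((PySem.List.pyRange 0 (min (s + 1) cols) 1).foldl
      (fun st k => pvStep kwL st (pvChar a (s - k) k)) ([], cnt)).2) c4
  let c6 := (PySem.List.pyRange 1 cols 1).foldl (fun cnt s =>
    ((PySem.List.pyRange 0 (min rows (cols - s)) 1).foldl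
      (fun st k => pvStep kwL st (pvChar a (rows - 1 - k) (s + k))) ([], cnt)).2) c5
  -- Bottom-right to top-left
  let c7 := (PySem.List.pyRange (rows - 1) (-1) (-1)).foldl (fun cnt s =>
    ((PySem.List.pyRange 0 (min (s + 1) cols) 1).foldl
      (fun st k => pvStep kwL st (pvChar a (s - k) (cols - 1 - k))) ([], cnt)).2) c6
  let c8 := (PySem.List.pyRange (cols - 2) (-1) (-1)).foldl (fun cnt s =>
    ((PySem.List.pyRange 0 (min rows (s + 1)) 1).foldl
      (fun st k => pvStep kwL st (pvChar a (rows - 1 - k) (s - k))) ([], cnt)).2) c7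
  c8

-- ===== PORT B =====
-- _occ: overlapping occurrences of w in s (while t: if t.startswith(w): count += 1; t = t[1:])
def pvOcc (w : List Char) : List Char → Int
  | [] => 0
  | c :: t => (if PySem.Chars.startswith (c :: t) w then 1 else 0) + pvOcc w t

-- one '\'-diagonal (c - r = d), read top-left -> bottom-right
def pvDiag1 (a : List String) (rows cols d : Int) : List Char :=
  (PySem.List.pyRange (max 0 (-d)) (min rows (cols - d)) 1).map (fun r => pvChar a r (r + d))

-- one '/'-diagonal (r + c = d), read top-right -> bottom-left
def pvDiag2 (a : List String) (rows cols d : Int) : List Char :=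
  (PySem.List.pyRange (max 0 (d - cols + 1)) (min rows (d + 1)) 1).map (fun r => pvChar a r (d - r))

def count_diagonal_all_directions_alt (a : List String) (kw : String) : Int :=
  let rows : Int := a.length
  let cols : Int := ((PySem.List.pyGet? a 0).getD "").toList.length
  let diagonals :=
    (PySem.List.pyRange (1 - rows) cols 1).map (pvDiag1 a rows cols)
      ++ (PySem.List.pyRange 0 (rows + cols - 1) 1).map (pvDiag2 a rows cols)
  let kwL := kw.toList
  if kwL = [] then 0
  else
    let rkw := kwL.reverse
    (diagonals.map (fun s => pvOcc kwL s + pvOcc rkw s)).sum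

-- ===== PRECONDITION & SPEC =====
-- Pre_ excludes exactly the inputs where Python A raises IndexError: the empty grid
-- (len(a[0])) and grids with a row shorter than the first row (a[r][c] out of range).
def Pre_count_diagonal_all_directions (a : List String) (kw : String) : Prop :=
  a ≠ [] ∧ ∀ s ∈ a, (a.headI).toList.length ≤ s.toList.length
instance (a : List String) (kw : String) : Decidable (Pre_count_diagonal_all_directions a kw) := by
  unfold Pre_count_diagonal_all_directions; infer_instance
def pvWitness_count_diagonal_all_directions : List String × String := (["abc", "cab"], "ab")

def Spec_count_diagonal_all_directions (a : List String) (kw : String) (out : Int) : Prop := out = count_diagonal_all_directions_alt a kw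
instance (a : List String) (kw : String) (out : Int) : Decidable (Spec_count_diagonal_all_directions a kw out) := by unfold Spec_count_diagonal_all_directions; infer_instance

-- ===== CLAIM (what is proved, stated in full; the proofs are below) =====
def Claim_equal_count_diagonal_all_directions : Prop := ∀ (a : List String) (kw : String), Dom_count_diagonal_all_directions a kw → Pre_count_diagonal_all_directions a kw → Spec_count_diagonal_all_directions a kw (count_diagonal_all_directions a kw)

-- ===== LEMMAS AND PROOFS =====

lemma pvOcc_nil_of_short (w : List Char) : ∀ t : List Char, t.length < w.length → pvOcc w t = 0 := by
  intro t
  induction t with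
  | nil => intro _; rfl
  | cons c t ih =>
    intro h
    have hnp : ¬ (w <+: (c :: t)) := by
      intro hp
      have := hp.length_le
      simp at this h; omega
    simp only [pvOcc, PySem.Chars.startswith]
    rw [ih (by simp at h ⊢; omega)]
    simp [List.isPrefixOf_iff_prefix, hnp]

lemma pvSlide_nil : ∀ (s word : List Char) (cnt : Int),
    (List.foldl (pvStep []) (word, cnt) s).2 = cnt := by
  intro s
  induction s with
  | nil => intro word cnt; rfl
  | cons c s ih =>
    intro word cnt
    have : pvStep [] (word, cnt) c = (word ++ [c], cnt) := by
      simp [pvStep]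
    rw [List.foldl_cons, this, ih]

lemma pvSlide (kw : List Char) : ∀ (s word : List Char) (cnt : Int),
    word.length < kw.length →
    (List.foldl (pvStep kw) (word, cnt) s).2 = cnt + pvOcc kw (word ++ s) := by
  intro s
  induction s with
  | nil =>
    intro word cnt h
    simp only [List.foldl_nil, List.append_nil]
    rw [pvOcc_nil_of_short kw word h]
    ring
  | cons c s ih =>
    intro word cnt h
    rw [List.foldl_cons]
    by_cases hw : (word ++ [c]).length = kw.length
    · have hstep : pvStep kw (word, cnt) c
        = ((word ++ [c]).drop 1, if word ++ [c] = kw then cnt + 1 else cnt) := by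
        simp [pvStep, hw]
      rw [hstep, ih _ _ (by simp at hw ⊢; omega)]
      have hne : word ++ [c] ≠ [] := by simp
      obtain ⟨d, u, hdu⟩ : ∃ d u, word ++ [c] = d :: u := by
        cases hcc : word ++ [c] with
        | nil => exact absurd hcc hne
        | cons d u => exact ⟨d, u, rfl⟩
      have hfull : word ++ c :: s = d :: (u ++ s) := by
        rw [show word ++ c :: s = (word ++ [c]) ++ s by simp, hdu]; simp
      rw [hfull]
      simp only [pvOcc]
      have hdrop : List.drop 1 (word ++ [c]) = u := by rw [hdu]; simp
      rw [hdrop]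
      have hiff : (PySem.Chars.startswith (d :: (u ++ s)) kw = true) ↔ word ++ [c] = kw := by
        simp only [PySem.Chars.startswith, List.isPrefixOf_iff_prefix]
        constructor
        · intro hp
          have h1 : kw = ((word ++ [c]) ++ s).take kw.length := by
            apply List.prefix_iff_eq_take.mp
            rw [hdu]; simpa using hp
          rw [← hw, List.take_left' rfl] at h1
          exact h1.symm
        · intro hkw
          rw [show d :: (u ++ s) = (word ++ [c]) ++ s by rw [hdu]; simp, hkw]
          exact List.prefix_append kw s
      by_cases hkw : word ++ [c] = kw
      · rw [if_pos hkw, if_pos (hiff.mpr hkw)]; ring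
      · rw [if_neg hkw, if_neg (fun hb => hkw (hiff.mp hb))]; ring
    · have hstep : pvStep kw (word, cnt) c = (word ++ [c], cnt) := by
        simp only [pvStep]; rw [if_neg hw]
      rw [hstep, ih _ _ (by simp at hw h ⊢; omega)]
      simp

lemma pvScanSum (kw : List Char) (hk : kw ≠ []) (starts : List Int) (m : Int → Int)
    (f : Int → Int → Char) (c0 : Int) :
    starts.foldl (fun cnt s =>
        ((PySem.List.pyRange 0 (m s) 1).foldl (fun st k => pvStep kw st (f s k)) ([], cnt)).2) c0
      = c0 + (starts.map (fun s => pvOcc kw ((PySem.List.pyRange 0 (m s) 1).map (f s)))).sum := by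
  rw [PySem.List.foldl_congr_mem starts _
      (fun cnt s => cnt + pvOcc kw ((PySem.List.pyRange 0 (m s) 1).map (f s))) c0 ?_]
  · exact PySem.List.foldl_add _ _ _
  · intro acc s _
    rw [← List.foldl_map, pvSlide kw _ [] acc (by simpa using List.length_pos_iff.mpr hk)]
    simp

lemma pvScanId (starts : List Int) (m : Int → Int)
    (f : Int → Int → Char) (c0 : Int) :
    starts.foldl (fun cnt s =>
        ((PySem.List.pyRange 0 (m s) 1).foldl (fun st k => pvStep [] st (f s k)) ([], cnt)).2) c0
      = c0 := by
  rw [PySem.List.foldl_congr_mem starts _ (fun cnt _ => cnt) c0 ?_]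
  · exact PySem.List.foldl_ignore _ _
  · intro acc s _
    rw [← List.foldl_map, pvSlide_nil]


lemma pvOcc_eq_countP (w : List Char) : ∀ t : List Char,
    pvOcc w t = ((List.range t.length).countP (fun i => decide ((t.drop i).take w.length = w)) : Int) := by
  intro t
  induction t with
  | nil => simp [pvOcc]
  | cons c t ih =>
    have hfun : ((fun i => decide ((((c :: t)).drop i).take w.length = w)) ∘ Nat.succ)
        = fun i => decide ((t.drop i).take w.length = w) := by
      funext i; simp [List.drop_succ_cons]
    simp only [pvOcc, ih, List.length_cons, List.range_succ_eq_map, List.countP_cons,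
      List.countP_map, hfun]
    have h0 : (PySem.Chars.startswith (c :: t) w = true) ↔ (((c :: t).drop 0).take w.length = w) := by
      simp only [PySem.Chars.startswith, List.isPrefixOf_iff_prefix, List.drop_zero]
      rw [List.prefix_iff_eq_take]
      exact eq_comm
    by_cases hc : PySem.Chars.startswith (c :: t) w = true
    · rw [if_pos hc, if_pos (by simpa using h0.mp hc)]
      push_cast; ring
    · rw [if_neg hc, if_neg (by simpa using (fun he => hc (h0.mpr he)))]
      push_cast; ring

lemma pvWindow_rev (t : List Char) (n i : Nat) (h : i + n ≤ t.length) :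
    (t.reverse.drop i).take n = ((t.drop (t.length - n - i)).take n).reverse := by
  have e1 : t.reverse.drop i = (t.take (t.length - i)).reverse := by
    rw [List.reverse_take]; congr 1; omega
  rw [e1, List.take_reverse, List.length_take, List.drop_take,
    show min (t.length - i) t.length - n = t.length - n - i by omega,
    show t.length - i - (t.length - n - i) = n by omega]

lemma pvCountP_range_card (L : Nat) (p : Nat → Bool) :
    (List.range L).countP p = ((Finset.range L).filter (fun i => p i = true)).card := by
  induction L with
  | zero => simp
  | succ L ih =>
    rw [List.range_succ, List.countP_append]
    rw [show Finset.range (L + 1) = insert L (Finset.range L) from Finset.range_add_one]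
    rw [Finset.filter_insert]
    by_cases hp : p L = true
    · rw [if_pos hp, Finset.card_insert_of_notMem (by simp)]
      simp [ih, hp]
    · rw [if_neg hp]
      simp [ih, hp]

lemma pvOcc_reverse (w : List Char) (hw : w ≠ []) (t : List Char) :
    pvOcc w t.reverse = pvOcc w.reverse t := by
  have hn : w.length ≠ 0 := by simpa using hw
  rw [pvOcc_eq_countP, pvOcc_eq_countP]
  simp only [List.length_reverse]
  congr 1
  rw [pvCountP_range_card, pvCountP_range_card]
  have hPle : ∀ i, ((t.reverse.drop i).take w.length = w) → i + w.length ≤ t.length := by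
    intro i he
    have := congrArg List.length he
    simp only [List.length_take, List.length_drop, List.length_reverse] at this
    omega
  have hQle : ∀ j, ((t.drop j).take w.length = w.reverse) → j + w.length ≤ t.length := by
    intro j he
    have := congrArg List.length he
    simp only [List.length_take, List.length_drop, List.length_reverse] at this
    omega
  apply Finset.card_bij (fun i _ => t.length - w.length - i)
  · intro a ha
    simp only [Finset.mem_filter, Finset.mem_range, decide_eq_true_eq] at ha ⊢
    obtain ⟨hlt, hP⟩ := ha
    have hle := hPle a hP
    refine ⟨by omega, ?_⟩
    have hwin := pvWindow_rev t w.length a (by omega)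
    rw [hwin] at hP
    exact List.reverse_eq_iff.mp hP
  · intro a₁ ha₁ a₂ ha₂ he
    simp only [Finset.mem_filter, Finset.mem_range, decide_eq_true_eq] at ha₁ ha₂
    have h1 := hPle a₁ ha₁.2
    have h2 := hPle a₂ ha₂.2
    omega
  · intro b hb
    simp only [Finset.mem_filter, Finset.mem_range, decide_eq_true_eq] at hb
    obtain ⟨hlt, hQ⟩ := hb
    have hle := hQle b hQ
    refine ⟨t.length - w.length - b, ?_, by omega⟩
    simp only [Finset.mem_filter, Finset.mem_range, decide_eq_true_eq]
    refine ⟨by omega, ?_⟩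
    have hwin := pvWindow_rev t w.length (t.length - w.length - b) (by omega)
    rw [hwin, show t.length - w.length - (t.length - w.length - b) = b by omega]
    rw [hQ, List.reverse_reverse]

lemma pvMap_pyRange_reindex {α : Type} (g g' : Int → α) (a b a' b' : Int)
    (hlen : (b - a).toNat = (b' - a').toNat)
    (h : ∀ k : Nat, (k : Int) < b - a → g (a + k) = g' (a' + k)) :
    (PySem.List.pyRange a b 1).map g = (PySem.List.pyRange a' b' 1).map g' := by
  rw [PySem.List.pyRange_one, PySem.List.pyRange_one, List.map_map, List.map_map, ← hlen]
  apply List.map_congr_left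
  intro k hk
  simp only [List.mem_range] at hk
  simp only [Function.comp_apply]
  exact h k (by omega)

lemma pvMap_pyRange_desc {α : Type} (g g' : Int → α) (a b lo hi : Int)
    (hlen : (b - a).toNat = (hi - lo).toNat)
    (h : ∀ k : Nat, (k : Int) < b - a → g (a + k) = g' (hi - 1 - k)) :
    (PySem.List.pyRange a b 1).map g = ((PySem.List.pyRange lo hi 1).map g').reverse := by
  have e : (PySem.List.pyRange lo hi 1).reverse = PySem.List.pyRange (hi - 1) (lo - 1) (-1) := by
    rw [PySem.List.pyRange_neg_one_eq_reverse]
    congr 2 <;> ring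
  rw [← List.map_reverse, e, PySem.List.pyRange_one, PySem.List.pyRange_neg_one, List.map_map,
    List.map_map, show hi - 1 - (lo - 1) = hi - lo by ring, ← hlen]
  apply List.map_congr_left
  intro k hk
  simp only [List.mem_range] at hk
  simp only [Function.comp_apply]
  exact h k (by omega)

lemma pvCharr (a : List String) (lo hi lo' hi' : Int) (r1 c1 r2 c2 : Int → Int)
    (hlen : (hi - lo).toNat = (hi' - lo').toNat)
    (h : ∀ k : Nat, (k : Int) < hi - lo → r1 (lo + k) = r2 (lo' + k) ∧ c1 (lo + k) = c2 (lo' + k)) :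
    (PySem.List.pyRange lo hi 1).map (fun k => pvChar a (r1 k) (c1 k))
      = (PySem.List.pyRange lo' hi' 1).map (fun k => pvChar a (r2 k) (c2 k)) := by
  apply pvMap_pyRange_reindex _ _ _ _ _ _ hlen
  intro k hk
  obtain ⟨h1, h2⟩ := h k hk
  rw [h1, h2]

lemma pvCharrDesc (a : List String) (lo hi lo' hi' : Int) (r1 c1 r2 c2 : Int → Int)
    (hlen : (hi - lo).toNat = (hi' - lo').toNat)
    (h : ∀ k : Nat, (k : Int) < hi - lo → r1 (lo + k) = r2 (hi' - 1 - k) ∧ c1 (lo + k) = c2 (hi' - 1 - k)) :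
    (PySem.List.pyRange lo hi 1).map (fun k => pvChar a (r1 k) (c1 k))
      = ((PySem.List.pyRange lo' hi' 1).map (fun k => pvChar a (r2 k) (c2 k))).reverse := by
  apply pvMap_pyRange_desc _ _ _ _ _ _ hlen
  intro k hk
  obtain ⟨h1, h2⟩ := h k hk
  rw [h1, h2]

lemma pvSum_countdown (F : Int → Int) (b : Int) :
    (List.map F (PySem.List.pyRange b (-1) (-1))).sum = (List.map F (PySem.List.pyRange 0 (b + 1) 1)).sum := by
  have h : PySem.List.pyRange b (-1) (-1) = (PySem.List.pyRange 0 (b + 1) 1).reverse := by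
    rw [PySem.List.pyRange_neg_one_eq_reverse]
    congr 2
  rw [h, List.map_reverse, List.sum_reverse]

lemma pvSum_reindex (F G : Int → Int) (a b a' b' : Int)
    (hlen : (b - a).toNat = (b' - a').toNat)
    (h : ∀ k : Nat, (k : Int) < b - a → F (a + k) = G (a' + k)) :
    (List.map F (PySem.List.pyRange a b 1)).sum = (List.map G (PySem.List.pyRange a' b' 1)).sum := by
  rw [pvMap_pyRange_reindex F G a b a' b' hlen h]

lemma pvSum_reindex_desc (F G : Int → Int) (a b lo hi : Int)
    (hlen : (b - a).toNat = (hi - lo).toNat)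
    (h : ∀ k : Nat, (k : Int) < b - a → F (a + k) = G (hi - 1 - k)) :
    (List.map F (PySem.List.pyRange a b 1)).sum = (List.map G (PySem.List.pyRange lo hi 1)).sum := by
  rw [pvMap_pyRange_desc F G a b lo hi hlen h, List.sum_reverse]

lemma pvSum_zero_of_nil (w : List Char) (dia : Int → List Char) (l : List Int)
    (h : ∀ d ∈ l, dia d = []) :
    (List.map (fun d => pvOcc w (dia d)) l).sum = 0 := by
  rw [List.map_congr_left (g := fun _ => (0 : Int)) (fun d hd => by rw [h d hd]; rfl)]
  simp

lemma pvMain (a : List String) (kw : String) :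
    count_diagonal_all_directions a kw = count_diagonal_all_directions_alt a kw := by
  by_cases hk : kw.toList = []
  · simp only [count_diagonal_all_directions, count_diagonal_all_directions_alt, hk]
    simp only [pvScanId]
    simp
  · simp only [count_diagonal_all_directions, count_diagonal_all_directions_alt]
    rw [if_neg hk]
    simp only [pvScanSum kw.toList hk]
    set R : Int := (a.length : Int) with hR
    set C : Int := (((PySem.List.pyGet? a 0).getD "").toList.length : Int) with hC
    have hR0 : 0 ≤ R := hR ▸ Int.natCast_nonneg _
    have hC0 : 0 ≤ C := hC ▸ Int.natCast_nonneg _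
    simp only [List.map_append, List.sum_append, List.map_map, Function.comp_def]
    rw [PySem.List.sum_map_add_int, PySem.List.sum_map_add_int]
    by_cases hC1 : C ≤ 0
    · have hz : ∀ (starts : List Int) (m : Int → Int) (f : Int → Int → Char),
          (∀ s ∈ starts, m s ≤ 0) →
          (List.map (fun s => pvOcc kw.toList (List.map (f s) (PySem.List.pyRange 0 (m s) 1))) starts).sum = 0 := by
        intro starts m f h
        rw [List.map_congr_left (g := fun _ => (0 : Int))
          (fun s hs => by rw [PySem.List.pyRange_one_eq_nil (by have := h s hs; omega)]; rfl)]
        simp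
      rw [hz (PySem.List.pyRange 0 R 1) (fun s => min (R - s) C) (fun s k => pvChar a (s + k) k)
            (by intro s hs; have := PySem.List.mem_pyRange_one.mp hs; dsimp only; omega),
          hz (PySem.List.pyRange 1 C 1) (fun s => min R (C - s)) (fun s k => pvChar a k (s + k))
            (by intro s hs; have := PySem.List.mem_pyRange_one.mp hs; dsimp only; omega),
          hz (PySem.List.pyRange 0 R 1) (fun s => min (R - s) C) (fun s k => pvChar a (s + k) (C - 1 - k))
            (by intro s hs; have := PySem.List.mem_pyRange_one.mp hs; dsimp only; omega),
          hz (PySem.List.pyRange (C - 2) (-1) (-1)) (fun s => min R (s + 1)) (fun s k => pvChar a k (s - k))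
            (by intro s hs; have := PySem.List.mem_pyRange_neg_one.mp hs; dsimp only; omega),
          hz (PySem.List.pyRange (R - 1) (-1) (-1)) (fun s => min (s + 1) C) (fun s k => pvChar a (s - k) k)
            (by intro s hs; have := PySem.List.mem_pyRange_neg_one.mp hs; dsimp only; omega),
          hz (PySem.List.pyRange 1 C 1) (fun s => min R (C - s)) (fun s k => pvChar a (R - 1 - k) (s + k))
            (by intro s hs; have := PySem.List.mem_pyRange_one.mp hs; dsimp only; omega),
          hz (PySem.List.pyRange (R - 1) (-1) (-1)) (fun s => min (s + 1) C) (fun s k => pvChar a (s - k) (C - 1 - k))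
            (by intro s hs; have := PySem.List.mem_pyRange_neg_one.mp hs; dsimp only; omega),
          hz (PySem.List.pyRange (C - 2) (-1) (-1)) (fun s => min R (s + 1)) (fun s k => pvChar a (R - 1 - k) (s - k))
            (by intro s hs; have := PySem.List.mem_pyRange_neg_one.mp hs; dsimp only; omega)]
      have hd1 : ∀ d ∈ PySem.List.pyRange (1 - R) C 1, pvDiag1 a R C d = [] := by
        intro d hd
        have := PySem.List.mem_pyRange_one.mp hd
        simp only [pvDiag1]
        rw [PySem.List.pyRange_one_eq_nil (by omega)]
        rfl
      have hd2 : ∀ d ∈ PySem.List.pyRange 0 (R + C - 1) 1, pvDiag2 a R C d = [] := by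
        intro d hd
        have := PySem.List.mem_pyRange_one.mp hd
        simp only [pvDiag2]
        rw [PySem.List.pyRange_one_eq_nil (by omega)]
        rfl
      rw [pvSum_zero_of_nil kw.toList (pvDiag1 a R C) _ hd1,
        pvSum_zero_of_nil kw.toList.reverse (pvDiag1 a R C) _ hd1,
        pvSum_zero_of_nil kw.toList (pvDiag2 a R C) _ hd2,
        pvSum_zero_of_nil kw.toList.reverse (pvDiag2 a R C) _ hd2]
      norm_num
    · rw [not_le] at hC1
      have hG1 : (List.map (fun s => pvOcc kw.toList (List.map (fun k => pvChar a (s + k) k) (PySem.List.pyRange 0 (min (R - s) C)))) (PySem.List.pyRange 0 R)).sum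
          = (List.map (fun d => pvOcc kw.toList (pvDiag1 a R C d)) (PySem.List.pyRange (1 - R) 1)).sum := by
        refine pvSum_reindex_desc _ _ _ _ _ _ (by omega) ?_
        intro k hkk
        dsimp only
        congr 1
        simp only [pvDiag1]
        refine pvCharr a _ _ _ _ _ _ _ _ (by omega) ?_
        intro j hj
        exact ⟨by omega, by omega⟩
      have hG2 : (List.map (fun s => pvOcc kw.toList (List.map (fun k => pvChar a k (s + k)) (PySem.List.pyRange 0 (min R (C - s))))) (PySem.List.pyRange 1 C)).sum
          = (List.map (fun d => pvOcc kw.toList (pvDiag1 a R C d)) (PySem.List.pyRange 1 C)).sum := by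
        refine pvSum_reindex _ _ _ _ _ _ (by omega) ?_
        intro k hkk
        dsimp only
        congr 1
        simp only [pvDiag1]
        refine pvCharr a _ _ _ _ _ _ _ _ (by omega) ?_
        intro j hj
        exact ⟨by omega, by omega⟩
      have hG3 : (List.map (fun s => pvOcc kw.toList (List.map (fun k => pvChar a (s + k) (C - 1 - k)) (PySem.List.pyRange 0 (min (R - s) C)))) (PySem.List.pyRange 0 R)).sum
          = (List.map (fun d => pvOcc kw.toList (pvDiag2 a R C d)) (PySem.List.pyRange (C - 1) (R + C - 1))).sum := by
        refine pvSum_reindex _ _ _ _ _ _ (by omega) ?_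
        intro k hkk
        dsimp only
        congr 1
        simp only [pvDiag2]
        refine pvCharr a _ _ _ _ _ _ _ _ (by omega) ?_
        intro j hj
        exact ⟨by omega, by omega⟩
      have hG4 : (List.map (fun s => pvOcc kw.toList (List.map (fun k => pvChar a k (s - k)) (PySem.List.pyRange 0 (min R (s + 1))))) (PySem.List.pyRange (C - 2) (-1) (-1))).sum
          = (List.map (fun d => pvOcc kw.toList (pvDiag2 a R C d)) (PySem.List.pyRange 0 (C - 1))).sum := by
        rw [pvSum_countdown]
        refine pvSum_reindex _ _ _ _ _ _ (by omega) ?_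
        intro k hkk
        dsimp only
        congr 1
        simp only [pvDiag2]
        refine pvCharr a _ _ _ _ _ _ _ _ (by omega) ?_
        intro j hj
        exact ⟨by omega, by omega⟩
      have hG5 : (List.map (fun s => pvOcc kw.toList (List.map (fun k => pvChar a (s - k) k) (PySem.List.pyRange 0 (min (s + 1) C)))) (PySem.List.pyRange (R - 1) (-1) (-1))).sum
          = (List.map (fun d => pvOcc kw.toList.reverse (pvDiag2 a R C d)) (PySem.List.pyRange 0 R)).sum := by
        rw [pvSum_countdown]
        refine pvSum_reindex _ _ _ _ _ _ (by omega) ?_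
        intro k hkk
        dsimp only
        rw [← pvOcc_reverse kw.toList hk]
        congr 1
        simp only [pvDiag2]
        refine pvCharrDesc a _ _ _ _ _ _ _ _ (by omega) ?_
        intro j hj
        exact ⟨by omega, by omega⟩
      have hG6 : (List.map (fun s => pvOcc kw.toList (List.map (fun k => pvChar a (R - 1 - k) (s + k)) (PySem.List.pyRange 0 (min R (C - s))))) (PySem.List.pyRange 1 C)).sum
          = (List.map (fun d => pvOcc kw.toList.reverse (pvDiag2 a R C d)) (PySem.List.pyRange R (R + C - 1))).sum := by
        refine pvSum_reindex _ _ _ _ _ _ (by omega) ?_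
        intro k hkk
        dsimp only
        rw [← pvOcc_reverse kw.toList hk]
        congr 1
        simp only [pvDiag2]
        refine pvCharrDesc a _ _ _ _ _ _ _ _ (by omega) ?_
        intro j hj
        exact ⟨by omega, by omega⟩
      have hG7 : (List.map (fun s => pvOcc kw.toList (List.map (fun k => pvChar a (s - k) (C - 1 - k)) (PySem.List.pyRange 0 (min (s + 1) C)))) (PySem.List.pyRange (R - 1) (-1) (-1))).sum
          = (List.map (fun d => pvOcc kw.toList.reverse (pvDiag1 a R C d)) (PySem.List.pyRange (C - R) C)).sum := by
        rw [pvSum_countdown]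
        refine pvSum_reindex_desc _ _ _ _ _ _ (by omega) ?_
        intro k hkk
        dsimp only
        rw [← pvOcc_reverse kw.toList hk]
        congr 1
        simp only [pvDiag1]
        refine pvCharrDesc a _ _ _ _ _ _ _ _ (by omega) ?_
        intro j hj
        exact ⟨by omega, by omega⟩
      have hG8 : (List.map (fun s => pvOcc kw.toList (List.map (fun k => pvChar a (R - 1 - k) (s - k)) (PySem.List.pyRange 0 (min R (s + 1))))) (PySem.List.pyRange (C - 2) (-1) (-1))).sum
          = (List.map (fun d => pvOcc kw.toList.reverse (pvDiag1 a R C d)) (PySem.List.pyRange (1 - R) (C - R))).sum := by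
        rw [pvSum_countdown]
        refine pvSum_reindex _ _ _ _ _ _ (by omega) ?_
        intro k hkk
        dsimp only
        rw [← pvOcc_reverse kw.toList hk]
        congr 1
        simp only [pvDiag1]
        refine pvCharrDesc a _ _ _ _ _ _ _ _ (by omega) ?_
        intro j hj
        exact ⟨by omega, by omega⟩
      rw [hG1, hG2, hG3, hG4, hG5, hG6, hG7, hG8]
      have m1 : (List.map (fun d => pvOcc kw.toList (pvDiag1 a R C d)) (PySem.List.pyRange (1 - R) 1)).sum
            + (List.map (fun d => pvOcc kw.toList (pvDiag1 a R C d)) (PySem.List.pyRange 1 C)).sum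
          = (List.map (fun d => pvOcc kw.toList (pvDiag1 a R C d)) (PySem.List.pyRange (1 - R) C)).sum := by
        rw [PySem.List.pyRange_one_append (1 - R) 1 C (by omega) (by omega), List.map_append, List.sum_append]
      have m2 : (List.map (fun d => pvOcc kw.toList.reverse (pvDiag1 a R C d)) (PySem.List.pyRange (1 - R) (C - R))).sum
            + (List.map (fun d => pvOcc kw.toList.reverse (pvDiag1 a R C d)) (PySem.List.pyRange (C - R) C)).sum
          = (List.map (fun d => pvOcc kw.toList.reverse (pvDiag1 a R C d)) (PySem.List.pyRange (1 - R) C)).sum := by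
        rw [PySem.List.pyRange_one_append (1 - R) (C - R) C (by omega) (by omega), List.map_append, List.sum_append]
      have m3 : (List.map (fun d => pvOcc kw.toList (pvDiag2 a R C d)) (PySem.List.pyRange 0 (C - 1))).sum
            + (List.map (fun d => pvOcc kw.toList (pvDiag2 a R C d)) (PySem.List.pyRange (C - 1) (R + C - 1))).sum
          = (List.map (fun d => pvOcc kw.toList (pvDiag2 a R C d)) (PySem.List.pyRange 0 (R + C - 1))).sum := by
        rw [PySem.List.pyRange_one_append 0 (C - 1) (R + C - 1) (by omega) (by omega), List.map_append, List.sum_append]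
      have m4 : (List.map (fun d => pvOcc kw.toList.reverse (pvDiag2 a R C d)) (PySem.List.pyRange 0 R)).sum
            + (List.map (fun d => pvOcc kw.toList.reverse (pvDiag2 a R C d)) (PySem.List.pyRange R (R + C - 1))).sum
          = (List.map (fun d => pvOcc kw.toList.reverse (pvDiag2 a R C d)) (PySem.List.pyRange 0 (R + C - 1))).sum := by
        rw [PySem.List.pyRange_one_append 0 R (R + C - 1) (by omega) (by omega), List.map_append, List.sum_append]
      linarith [m1, m2, m3, m4]

-- ===== VERDICT (by name: the statement is the Claim_ definition above) =====
theorem count_diagonal_all_directions_spec : Claim_equal_count_diagonal_all_directions := by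
  intro a kw _ _
  unfold Spec_count_diagonal_all_directions
  exact pvMain a kw
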